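-- pv_equiv track=rewrite | github.com/Petra313/bioinf | CH5/ba5h.py | fitting_alignment
-- ===== SOURCE A (Python) =====
-- def addDirection(m, p, s1, s2, i, j, penalty = -1):
--   new = (j + 1, i + 1) # trenutna pozicija u matrici (jer iskljucujemo 0,0)
--   # postavi vrijednost na 1 ako je s1 na i-toj poziciji jednak s2 na j-toj
--   # inace postavi na -1
--   match_ = 1 if s1[i] == s2[j] else penalty
--   opt = [
--       m[j, i] + match_, # gornjem lijevom elementu dodaj match
--       m[j, i + 1] + penalty, # gornjem dodaj penal
--       m[j + 1, i] + penalty, # lijevom dodaj penal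
--   ]
--   m[new] = max(opt) # na poziciji i+1 i j+1 u matrici je maksimum iz opt
--   # pronad maksimum izmedu vrijednosti
--   # gore-lijevo, gore i lijevo od elementa
--   p[new] = ["diagonal", "up", "left"][opt.index(max(opt))]
--   return m, p
--
-- def getWords(p, s1, s2, j, i):
--   a1, a2 = '',''
--   while i > 0 and j > 0: # dok su i *i* i *j* veci od 0
--     if p[j, i] == "diagonal": # ako je na putu p na poziciji j,i up-left
--       a1 += s1[i - 1] # uzmi prijasnji element od s1
--       a2 += s2[j - 1] # uzmi prijasnji element od s2
--       j, i = j - 1, i - 1 # samnji oba indeksa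
--     elif p[j, i] == "left": # ako je na putu p na poziciji j,i left
--       a1 += s1[i - 1] # uzmi prijasnji element iz s1
--       a2 += "-" # postavi na s2 crticu
--       i = i - 1 # smanji indeks i za 1
--     elif p[j, i] == "up": # ako jw na putu p na poziciji j, i up
--       a1 += "-" # postavi na s1 -
--       a2 += s2[j - 1] # uzmi prijasnji element iz s2
--       j = j - 1 # smanji indeks j za 1
--   return a1, a2
--
-- def fitting_alignment(s1, s2):
--   # rjecnici - matrice za pohranjivanje vrijednosti, smjera
--   m, p = {}, {}
--   for j in range(len(s2) + 1): # za svaki element u stringu s2 +1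
--     m[j, 0] = -j # vrijednost u prvom stupcu matrice je negativan index
--     p[j, 0] = "up" # u najlijevijem stupcu se samo moze ici prema gore
--   for i in range(len(s1) + 1): # za svaki element u stringu s1 +1
--     m[0, i] = 0 # vrojednost u prvom retku matrice su nule
--     p[0, i] = "left" # u prvom retku matrice mozemo samo ici lijevo
--   m[0, 0] = 0 # postavi 0,0 element matrice na 0
--   # iteriraj po matrici gdje je j oznaka retka, a i stupca
--   for j in range(len(s2)):
--     for i in range(len(s1)):
--       m, p = addDirection(m, p, s1, s2, i, j, penalty = -1)
--   # zadnja vrijednost stupca u svakom retku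
--   sc = [m[len(s2), i] for i in range(len(s1) + 1)]
--   max_score = max(sc) # pronadi maksimum u zadnjem retku
--   i = sc.index(max_score) # index maksimuma (index stupca)
--   j = len(s2) # j je velicina s2 - index retka
--   a1, a2 = getWords(p, s1, s2, j, i)
--   return max_score, a1[::-1], a2[::-1] # vrati maksimalni score, obrnute a1 i a2
-- ===== SOURCE B (Python) =====
-- def fitting_alignment(s1, s2):
--     # Same O(n1*n2) score DP, but with a list-of-lists score matrix and NO
--     # direction table: the alignment is reconstructed by recomputing, at each
--     # cell, which predecessor (diagonal > up > left) produced its value.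
--     n1, n2 = len(s1), len(s2)
--     m = [[0] * (n1 + 1)]
--     for j in range(1, n2 + 1):
--         prev = m[j - 1]
--         row = [-j]
--         for i in range(1, n1 + 1):
--             match_ = 1 if s1[i - 1] == s2[j - 1] else -1
--             row.append(max(prev[i - 1] + match_, prev[i] - 1, row[i - 1] - 1))
--         m.append(row)
--     last = m[n2]
--     max_score = max(last)
--     i = last.index(max_score)
--     j = n2
--     a1, a2 = [], []
--     while i > 0 and j > 0:
--         v = m[j][i]
--         match_ = 1 if s1[i - 1] == s2[j - 1] else -1
--         if m[j - 1][i - 1] + match_ == v: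
--             a1.append(s1[i - 1]); a2.append(s2[j - 1]); i -= 1; j -= 1
--         elif m[j - 1][i] - 1 == v:
--             a1.append("-"); a2.append(s2[j - 1]); j -= 1
--         else:
--             a1.append(s1[i - 1]); a2.append("-"); i -= 1
--     return max_score, "".join(reversed(a1)), "".join(reversed(a2))
-- ===== Notes on version B (the rewrite author's own statement) =====
-- stated objective: faster
-- what changed: B keeps the O(n1*n2) score DP but stores it as a list-of-lists matrix and drops A's direction dictionary entirely, reconstructing the alignment by recomputing each cell's predecessor (diagonal > up > left) during the traceback; per cell it does two list appends instead of A's four tuple-keyed dict operations plus building a 3-element list, max() and list.index().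
import Mathlib
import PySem

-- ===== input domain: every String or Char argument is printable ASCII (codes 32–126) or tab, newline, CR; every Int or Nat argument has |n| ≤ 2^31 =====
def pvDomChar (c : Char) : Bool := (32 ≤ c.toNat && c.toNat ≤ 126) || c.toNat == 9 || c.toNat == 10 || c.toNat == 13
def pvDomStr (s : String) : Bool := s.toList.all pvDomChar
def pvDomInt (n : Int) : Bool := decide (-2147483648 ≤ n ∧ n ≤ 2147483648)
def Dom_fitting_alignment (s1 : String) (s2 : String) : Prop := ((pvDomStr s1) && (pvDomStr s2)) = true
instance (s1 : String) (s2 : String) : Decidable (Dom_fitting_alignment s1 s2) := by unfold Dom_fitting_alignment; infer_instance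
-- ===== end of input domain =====

-- B replaces A's direction dictionary by a traceback that recomputes each cell's predecessor
-- (diagonal > up > left) from a list-of-lists score matrix; same return value, proved equal.

-- ===== PORT A =====
-- Python dicts keyed by (j, i) int pairs -> PySem.Dict (Int × Int) _.  String indexing s1[i]
-- (always in range at A's call sites) is ported as PySem.List.pyGetD on s1.toList, exact there;
-- dict reads m[j, i] (keys always present at A's call sites) as Dict.getD, exact there.
def addDirection (m : PySem.Dict (Int × Int) Int) (p : PySem.Dict (Int × Int) String)
    (t1 t2 : List Char) (i j : Int) (penalty : Int) :
    PySem.Dict (Int × Int) Int × PySem.Dict (Int × Int) String :=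
  let nw : Int × Int := (j + 1, i + 1)
  let match_ : Int := if PySem.List.pyGetD t1 i ' ' = PySem.List.pyGetD t2 j ' ' then 1 else penalty
  let opt : List Int :=
    [m.getD (j, i) 0 + match_, m.getD (j, i + 1) 0 + penalty, m.getD (j + 1, i) 0 + penalty]
  let mx : Int := (PySem.List.max? opt (fun y => y)).getD 0
  let idx : Nat := (PySem.List.index? opt mx).getD 0
  (m.insert nw mx, p.insert nw (PySem.List.pyGetD ["diagonal", "up", "left"] (idx : Int) ""))

-- the two border loops and the final 'm[0,0] = 0' of fitting_alignment
def bordersA (n1 n2 : Int) :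
    PySem.Dict (Int × Int) Int × PySem.Dict (Int × Int) String :=
  let mp0 := (PySem.List.pyRange 0 (n2 + 1) 1).foldl
    (fun mp j => (mp.1.insert (j, 0) (-j), mp.2.insert (j, 0) "up"))
    (PySem.Dict.empty, PySem.Dict.empty)
  let mp1 := (PySem.List.pyRange 0 (n1 + 1) 1).foldl
    (fun mp i => (mp.1.insert (0, i) 0, mp.2.insert (0, i) "left")) mp0
  (mp1.1.insert (0, 0) 0, mp1.2)

-- the nested fill loop 'for j in range(len(s2)): for i in range(len(s1)): …'
def fillA (t1 t2 : List Char) :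
    PySem.Dict (Int × Int) Int × PySem.Dict (Int × Int) String :=
  (PySem.List.pyRange 0 (PySem.List.len t2) 1).foldl
    (fun mp j => (PySem.List.pyRange 0 (PySem.List.len t1) 1).foldl
      (fun mp i => addDirection mp.1 mp.2 t1 t2 i j (-1)) mp)
    (bordersA (PySem.List.len t1) (PySem.List.len t2))

-- getWords' while loop; fuel (j+i).toNat bounds the iterations (each pass lowers i+j by ≥ 1,
-- and the loop stops at i = 0 or j = 0); on a direction outside {diagonal, left, up} Python
-- would loop forever — A never stores such a value, so that branch is unreachable.
def getWordsAux (p : PySem.Dict (Int × Int) String) (t1 t2 : List Char) :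
    Nat → Int → Int → List Char × List Char → List Char × List Char
  | 0, _, _, a => a
  | fuel + 1, j, i, (a1, a2) =>
    if i > 0 ∧ j > 0 then
      if p.getD (j, i) "" = "diagonal" then
        getWordsAux p t1 t2 fuel (j - 1) (i - 1)
          (a1 ++ [PySem.List.pyGetD t1 (i - 1) ' '], a2 ++ [PySem.List.pyGetD t2 (j - 1) ' '])
      else if p.getD (j, i) "" = "left" then
        getWordsAux p t1 t2 fuel j (i - 1) (a1 ++ [PySem.List.pyGetD t1 (i - 1) ' '], a2 ++ ['-'])
      else if p.getD (j, i) "" = "up" then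
        getWordsAux p t1 t2 fuel (j - 1) i (a1 ++ ['-'], a2 ++ [PySem.List.pyGetD t2 (j - 1) ' '])
      else (a1, a2)
    else (a1, a2)

def fitting_alignment (s1 : String) (s2 : String) : Int × String × String :=
  let t1 := s1.toList
  let t2 := s2.toList
  let mp := fillA t1 t2
  let sc := (PySem.List.pyRange 0 (PySem.List.len t1 + 1) 1).map
    (fun i => mp.1.getD (PySem.List.len t2, i) 0)
  let max_score := (PySem.List.max? sc (fun y => y)).getD 0
  let i : Int := ((PySem.List.index? sc max_score).getD 0 : Nat)
  let j : Int := PySem.List.len t2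
  let a := getWordsAux mp.2 t1 t2 (j + i).toNat j i ([], [])
  (max_score, String.ofList a.1.reverse, String.ofList a.2.reverse)

-- ===== PORT B =====
-- the score matrix as a list of rows, built left-to-right, top-to-bottom (no direction table);
-- Python max(x, y, z) on ints is max (max x y) z; a1[::-1] / reversed(a1) is List.reverse
def rowsB (t1 t2 : List Char) : List (List Int) :=
  (PySem.List.pyRange 1 (PySem.List.len t2 + 1) 1).foldl
    (fun m j =>
      let prev := PySem.List.pyGetD m (j - 1) []
      let row := (PySem.List.pyRange 1 (PySem.List.len t1 + 1) 1).foldl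
        (fun row i =>
          let match_ : Int :=
            if PySem.List.pyGetD t1 (i - 1) ' ' = PySem.List.pyGetD t2 (j - 1) ' ' then 1 else -1
          row ++ [max (max (PySem.List.pyGetD prev (i - 1) 0 + match_)
                           (PySem.List.pyGetD prev i 0 - 1))
                      (PySem.List.pyGetD row (i - 1) 0 - 1)])
        [-j]
      m ++ [row])
    [List.replicate (t1.length + 1) 0]

-- B's traceback while loop, same fuel convention as getWordsAux
def traceAux (m : List (List Int)) (t1 t2 : List Char) :
    Nat → Int → Int → List Char × List Char → List Char × List Char
  | 0, _, _, a => a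
  | fuel + 1, j, i, (a1, a2) =>
    if i > 0 ∧ j > 0 then
      let v := PySem.List.pyGetD (PySem.List.pyGetD m j []) i 0
      let match_ : Int :=
        if PySem.List.pyGetD t1 (i - 1) ' ' = PySem.List.pyGetD t2 (j - 1) ' ' then 1 else -1
      if PySem.List.pyGetD (PySem.List.pyGetD m (j - 1) []) (i - 1) 0 + match_ = v then
        traceAux m t1 t2 fuel (j - 1) (i - 1)
          (a1 ++ [PySem.List.pyGetD t1 (i - 1) ' '], a2 ++ [PySem.List.pyGetD t2 (j - 1) ' '])
      else if PySem.List.pyGetD (PySem.List.pyGetD m (j - 1) []) i 0 - 1 = v then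
        traceAux m t1 t2 fuel (j - 1) i (a1 ++ ['-'], a2 ++ [PySem.List.pyGetD t2 (j - 1) ' '])
      else
        traceAux m t1 t2 fuel j (i - 1) (a1 ++ [PySem.List.pyGetD t1 (i - 1) ' '], a2 ++ ['-'])
    else (a1, a2)

def fitting_alignment_alt (s1 : String) (s2 : String) : Int × String × String :=
  let t1 := s1.toList
  let t2 := s2.toList
  let m := rowsB t1 t2
  let last := PySem.List.pyGetD m (PySem.List.len t2) []
  let max_score := (PySem.List.max? last (fun y => y)).getD 0
  let i : Int := ((PySem.List.index? last max_score).getD 0 : Nat)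
  let j : Int := PySem.List.len t2
  let a := traceAux m t1 t2 (j + i).toNat j i ([], [])
  (max_score, String.ofList a.1.reverse, String.ofList a.2.reverse)

-- ===== PRECONDITION & SPEC =====
def Spec_fitting_alignment (s1 : String) (s2 : String) (out : Int × String × String) : Prop := out = fitting_alignment_alt s1 s2
instance (s1 : String) (s2 : String) (out : Int × String × String) : Decidable (Spec_fitting_alignment s1 s2 out) := by unfold Spec_fitting_alignment; infer_instance

-- ===== CLAIM (what is proved, stated in full; the proofs are below) =====
def Claim_equal_fitting_alignment : Prop := ∀ (s1 : String) (s2 : String), Dom_fitting_alignment s1 s2 → Spec_fitting_alignment s1 s2 (fitting_alignment s1 s2)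

-- ===== LEMMAS AND PROOFS =====

-- match score of s1[i] vs s2[j] (0-based character indices)
def mtc (t1 t2 : List Char) (i j : Nat) : Int :=
  if t1.getD i ' ' = t2.getD j ' ' then 1 else -1

-- the DP value at cell (row j, column i) of the score matrix
def Mv (t1 t2 : List Char) : Nat → Nat → Int
  | j, 0 => -(j : Int)
  | 0, _ + 1 => 0
  | j + 1, i + 1 =>
    max (max (Mv t1 t2 j i + mtc t1 t2 i j) (Mv t1 t2 j (i + 1) - 1)) (Mv t1 t2 (j + 1) i - 1)
  termination_by j i => (j, i)

theorem Mv_succ_succ (t1 t2 : List Char) (j i : Nat) :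
    Mv t1 t2 (j + 1) (i + 1) =
      max (max (Mv t1 t2 j i + mtc t1 t2 i j) (Mv t1 t2 j (i + 1) - 1))
          (Mv t1 t2 (j + 1) i - 1) := by rw [Mv]
-- generic fold-insert lemmas

theorem Mv_j_zero (t1 t2 : List Char) (j : Nat) : Mv t1 t2 j 0 = -(j : Int) := by rw [Mv]
theorem Mv_zero (t1 t2 : List Char) (i : Nat) : Mv t1 t2 0 i = 0 := by
  cases i with
  | zero => rw [Mv]; rfl
  | succ i => rw [Mv]

-- the direction A stores at cell (j+1, i+1): first index of the maximum of opt
def Dv (t1 t2 : List Char) (j i : Nat) : String :=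
  let a := Mv t1 t2 j i + mtc t1 t2 i j
  let b := Mv t1 t2 j (i + 1) - 1
  let c := Mv t1 t2 (j + 1) i - 1
  let mx := max (max a b) c
  if a = mx then "diagonal" else if b = mx then "up" else "left"

theorem getD_fst_pairfold_of_forall_ne (key : Int → Int × Int) (v : Int → Int)
    (w : Int → String) (l : List Int) (mp : PySem.Dict (Int × Int) Int × PySem.Dict (Int × Int) String)
    (k : Int × Int) (h : ∀ x ∈ l, key x ≠ k) :
    (l.foldl (fun mp y => (mp.1.insert (key y) (v y), mp.2.insert (key y) (w y))) mp).1.getD k 0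
      = mp.1.getD k 0 := by
  induction l generalizing mp with
  | nil => rfl
  | cons a l ih =>
    simp only [List.foldl_cons]
    rw [ih _ (fun x hx => h x (List.mem_cons_of_mem a hx))]
    rw [PySem.Dict.getD_insert, if_neg (fun he => h a List.mem_cons_self he.symm)]

theorem getD_fst_pairfold_mem (key : Int → Int × Int) (v : Int → Int) (w : Int → String)
    (hinj : ∀ a b : Int, key a = key b → a = b) :
    ∀ (l : List Int) (mp : PySem.Dict (Int × Int) Int × PySem.Dict (Int × Int) String)
      (x : Int), x ∈ l → l.Pairwise (· < ·) →
    (l.foldl (fun mp y => (mp.1.insert (key y) (v y), mp.2.insert (key y) (w y))) mp).1.getD (key x) 0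
      = v x := by
  intro l
  induction l with
  | nil => intro mp x hx; simp at hx
  | cons a l ih =>
    intro mp x hx hp
    rw [List.pairwise_cons] at hp
    rcases List.mem_cons.mp hx with rfl | hxl
    · simp only [List.foldl_cons]
      rw [getD_fst_pairfold_of_forall_ne _ _ _ _ _ _ (by
        intro y hy he
        have := hinj _ _ he
        have := hp.1 y hy
        omega)]
      simp [PySem.Dict.getD_insert_self]
    · simp only [List.foldl_cons]
      exact ih _ x hxl hp.2

theorem bordersA_m (n1 n2 : Nat) :
    (∀ j : Nat, j ≤ n2 → (bordersA (n1 : Int) (n2 : Int)).1.getD ((j : Int), 0) 0 = -(j : Int)) ∧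
    (∀ i : Nat, i ≤ n1 → (bordersA (n1 : Int) (n2 : Int)).1.getD (0, (i : Int)) 0 = 0) := by
  rw [bordersA]
  simp only
  constructor
  · intro j hj
    by_cases hj0 : j = 0
    · subst hj0; simp [PySem.Dict.getD_insert_self]
    · rw [PySem.Dict.getD_insert, if_neg (by simp; omega)]
      rw [getD_fst_pairfold_of_forall_ne (fun i => ((0:Int), i)) (fun _ => 0) (fun _ => "left")
        _ _ _ (by
          intro x hx he
          have h1 : (0 : Int) = (j : Int) := congrArg Prod.fst he
          omega)]
      exact getD_fst_pairfold_mem (fun y => (y, (0:Int))) (fun y => -y) (fun _ => "up")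
        (by intro a b h; simpa using congrArg Prod.fst h) _ _ (j : Int)
        (by rw [PySem.List.mem_pyRange_one]; omega)
        (PySem.List.pairwise_lt_pyRange_one _ _)
  · intro i hi
    by_cases hi0 : i = 0
    · subst hi0; simp [PySem.Dict.getD_insert_self]
    · rw [PySem.Dict.getD_insert, if_neg (by simp; omega)]
      exact getD_fst_pairfold_mem (fun y => ((0:Int), y)) (fun _ => 0) (fun _ => "left")
        (by intro a b h; simpa using congrArg Prod.snd h) _ _ (i : Int)
        (by rw [PySem.List.mem_pyRange_one]; omega)
        (PySem.List.pairwise_lt_pyRange_one _ _)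

-- invariant after the first inn steps of row jn of the fill loop (InvA = rows < jn done)
def InnA (t1 t2 : List Char) (jn inn : Nat)
    (mp : PySem.Dict (Int × Int) Int × PySem.Dict (Int × Int) String) : Prop :=
  (∀ j i : Nat, j ≤ t2.length → i ≤ t1.length →
      (i = 0 ∨ j = 0 ∨ j ≤ jn ∨ (j = jn + 1 ∧ i ≤ inn)) →
      mp.1.getD ((j : Int), (i : Int)) 0 = Mv t1 t2 j i)
  ∧ (∀ j i : Nat, i < t1.length → (j < jn ∨ (j = jn ∧ i < inn)) →
      mp.2.getD ((j : Int) + 1, (i : Int) + 1) "" = Dv t1 t2 j i)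

def InvA (t1 t2 : List Char) (jn : Nat)
    (mp : PySem.Dict (Int × Int) Int × PySem.Dict (Int × Int) String) : Prop :=
  InnA t1 t2 jn 0 mp

theorem addDirection_step (t1 t2 : List Char) (jn inn : Nat)
    (hj : jn < t2.length) (hi : inn < t1.length)
    (mp : PySem.Dict (Int × Int) Int × PySem.Dict (Int × Int) String)
    (h : InnA t1 t2 jn inn mp) :
    InnA t1 t2 jn (inn + 1) (addDirection mp.1 mp.2 t1 t2 (inn : Int) (jn : Int) (-1)) := by
  obtain ⟨hm, hp⟩ := h
  have hra : mp.1.getD ((jn : Int), (inn : Int)) 0 = Mv t1 t2 jn inn :=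
    hm jn inn (by omega) (by omega) (by omega)
  have hrb : mp.1.getD ((jn : Int), (inn : Int) + 1) 0 = Mv t1 t2 jn (inn + 1) := by
    have := hm jn (inn + 1) (by omega) (by omega) (by omega)
    push_cast at this; exact this
  have hrc : mp.1.getD ((jn : Int) + 1, (inn : Int)) 0 = Mv t1 t2 (jn + 1) inn := by
    have := hm (jn + 1) inn (by omega) (by omega) (by omega)
    push_cast at this; exact this
  have hmt : (if PySem.List.pyGetD t1 (inn : Int) ' ' = PySem.List.pyGetD t2 (jn : Int) ' '
      then (1 : Int) else -1) = mtc t1 t2 inn jn := by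
    simp [PySem.List.pyGetD_natCast, mtc]
  rw [addDirection]
  simp only [hmt, hra, hrb, hrc]
  set a := Mv t1 t2 jn inn + mtc t1 t2 inn jn with hadef
  set b := Mv t1 t2 jn (inn + 1) + (-1) with hbdef
  set c := Mv t1 t2 (jn + 1) inn + (-1) with hcdef
  have hmx : (PySem.List.max? [a, b, c] (fun y => y)).getD 0 = max (max a b) c := by
    rw [PySem.List.max?_id_cons]; rfl
  have hMv : Mv t1 t2 (jn + 1) (inn + 1) = max (max a b) c := by
    rw [Mv_succ_succ]; simp [hadef, hbdef, hcdef, sub_eq_add_neg]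
  have hDv : Dv t1 t2 jn inn =
      (if a = max (max a b) c then "diagonal"
       else if b = max (max a b) c then "up" else "left") := by
    rw [Dv]
    simp only [hadef, hbdef, hcdef, sub_eq_add_neg]
  have hstr : PySem.List.pyGetD ["diagonal", "up", "left"]
      (((PySem.List.index? [a, b, c] ((PySem.List.max? [a, b, c] (fun y => y)).getD 0)).getD 0 : Nat) : Int) ""
      = Dv t1 t2 jn inn := by
    rw [hmx, hDv]
    by_cases hA : a = max (max a b) c
    · have hidx : PySem.List.index? [a, b, c] (max (max a b) c) = some 0 := by
        rw [← hA]; exact PySem.List.index?_cons_self _ _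
      rw [if_pos hA, hidx]; rfl
    · rw [if_neg hA, PySem.List.index?_cons_of_ne _ hA]
      by_cases hB : b = max (max a b) c
      · have hidx : PySem.List.index? [b, c] (max (max a b) c) = some 0 := by
          rw [← hB]; exact PySem.List.index?_cons_self _ _
        rw [if_pos hB, hidx]; rfl
      · rw [if_neg hB, PySem.List.index?_cons_of_ne _ hB]
        have hC : c = max (max a b) c := by
          rcases max_choice (max a b) c with h | h
          · exfalso
            rcases max_choice a b with h' | h'
            · exact hA (by rw [h, h'])
            · exact hB (by rw [h, h'])
          · exact h.symm
        have hidx : PySem.List.index? [c] (max (max a b) c) = some 0 := by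
          rw [← hC]; exact PySem.List.index?_cons_self _ _
        rw [hidx]; rfl
  constructor
  · intro j i hjl hil hcond
    by_cases hnew : j = jn + 1 ∧ i = inn + 1
    · obtain ⟨rfl, rfl⟩ := hnew
      push_cast
      rw [PySem.Dict.getD_insert_self, hmx, hMv]
    · have hne : ((j : Int), (i : Int)) ≠ ((jn : Int) + 1, (inn : Int) + 1) := by
        intro he
        have h1 : (j : Int) = (jn : Int) + 1 := congrArg Prod.fst he
        have h2 : (i : Int) = (inn : Int) + 1 := congrArg Prod.snd he
        exact hnew ⟨by omega, by omega⟩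
      rw [PySem.Dict.getD_insert, if_neg hne]
      refine hm j i hjl hil ?_
      rcases hcond with h | h | h | ⟨h1, h2⟩
      · tauto
      · tauto
      · tauto
      · right; right; right
        refine ⟨h1, ?_⟩
        by_contra hgt
        exact hnew ⟨h1, by omega⟩
  · intro j i hil hcond
    by_cases hnew : j = jn ∧ i = inn
    · obtain ⟨rfl, rfl⟩ := hnew
      rw [PySem.Dict.getD_insert_self]
      exact hstr
    · have hne : ((j : Int) + 1, (i : Int) + 1) ≠ ((jn : Int) + 1, (inn : Int) + 1) := by
        intro he
        have h1 : (j : Int) + 1 = (jn : Int) + 1 := congrArg Prod.fst he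
        have h2 : (i : Int) + 1 = (inn : Int) + 1 := congrArg Prod.snd he
        exact hnew ⟨by omega, by omega⟩
      rw [PySem.Dict.getD_insert, if_neg hne]
      refine hp j i hil ?_
      rcases hcond with h | ⟨h1, h2⟩
      · tauto
      · right
        refine ⟨h1, ?_⟩
        by_contra hgt
        exact hnew ⟨h1, by omega⟩

theorem fillA_inner (t1 t2 : List Char) (jn : Nat) (hj : jn < t2.length) :
    ∀ (inn : Nat), inn ≤ t1.length →
    ∀ (mp : PySem.Dict (Int × Int) Int × PySem.Dict (Int × Int) String),
      InvA t1 t2 jn mp →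
      InnA t1 t2 jn inn ((PySem.List.pyRange 0 (inn : Int) 1).foldl
        (fun mp i => addDirection mp.1 mp.2 t1 t2 i (jn : Int) (-1)) mp) := by
  intro inn
  induction inn with
  | zero =>
    intro _ mp h
    simpa [PySem.List.pyRange_zero] using h
  | succ m ih =>
    intro hle mp h
    have hcast : ((m : Int) + 1) = ((m + 1 : Nat) : Int) := by push_cast; ring
    rw [← hcast, PySem.List.pyRange_one_succ_right (by positivity), List.foldl_append]
    simp only [List.foldl_cons, List.foldl_nil]
    exact addDirection_step t1 t2 jn m hj (by omega) _ (ih (by omega) mp h)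

theorem fillA_outer (t1 t2 : List Char) :
    ∀ (jn : Nat), jn ≤ t2.length →
    InvA t1 t2 jn ((PySem.List.pyRange 0 (jn : Int) 1).foldl
      (fun mp j => (PySem.List.pyRange 0 (PySem.List.len t1) 1).foldl
        (fun mp i => addDirection mp.1 mp.2 t1 t2 i j (-1)) mp)
      (bordersA (PySem.List.len t1) (PySem.List.len t2))) := by
  intro jn
  induction jn with
  | zero =>
    intro _
    simp only [Nat.cast_zero, PySem.List.pyRange_zero, Int.toNat_zero, List.range_zero,
      List.map_nil, List.foldl_nil]
    constructor
    · intro j i hjl hil hcond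
      have hb := bordersA_m t1.length t2.length
      rcases hcond with rfl | rfl | h | ⟨h1, h2⟩
      · rw [Mv_j_zero]
        simpa [PySem.List.len_eq] using hb.1 j hjl
      · rw [Mv_zero]
        simpa [PySem.List.len_eq] using hb.2 i hil
      · have hj0 : j = 0 := by omega
        subst hj0
        rw [Mv_zero]
        simpa [PySem.List.len_eq] using hb.2 i hil
      · have hi0 : i = 0 := by omega
        subst hi0
        rw [Mv_j_zero]
        simpa [PySem.List.len_eq] using hb.1 j hjl
    · intro j i _ hcond
      omega
  | succ m ih =>
    intro hle
    have hcast : ((m : Int) + 1) = ((m + 1 : Nat) : Int) := by push_cast; ring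
    rw [← hcast, PySem.List.pyRange_one_succ_right (by positivity), List.foldl_append]
    simp only [List.foldl_cons, List.foldl_nil]
    have hin := fillA_inner t1 t2 m (by omega) t1.length (le_refl _) _ (ih (by omega))
    rw [PySem.List.len_eq] at *
    constructor
    · intro j i hjl hil hcond
      exact hin.1 j i hjl hil (by omega)
    · intro j i hil hcond
      exact hin.2 j i hil (by omega)

theorem fillA_spec (t1 t2 : List Char) :
    (∀ j i : Nat, j ≤ t2.length → i ≤ t1.length →
      (fillA t1 t2).1.getD ((j : Int), (i : Int)) 0 = Mv t1 t2 j i) ∧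
    (∀ j i : Nat, j < t2.length → i < t1.length →
      (fillA t1 t2).2.getD ((j : Int) + 1, (i : Int) + 1) "" = Dv t1 t2 j i) := by
  have h := fillA_outer t1 t2 t2.length (le_refl _)
  rw [fillA]
  rw [show PySem.List.len t2 = ((t2.length : Nat) : Int) from PySem.List.len_eq t2]
  constructor
  · intro j i hjl hil
    exact h.1 j i hjl hil (by omega)
  · intro j i hjl hil
    exact h.2 j i hil (by omega)

-- row j of B's matrix as a function
def rowFun (t1 t2 : List Char) (j : Nat) : List Int :=
  (List.range (t1.length + 1)).map (fun i => Mv t1 t2 j i)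

theorem rowFun_zero (t1 t2 : List Char) :
    rowFun t1 t2 0 = List.replicate (t1.length + 1) 0 := by
  rw [rowFun]
  calc (List.range (t1.length + 1)).map (fun i => Mv t1 t2 0 i)
      = (List.range (t1.length + 1)).map (fun _ => (0 : Int)) := by
        exact List.map_congr_left (fun i _ => Mv_zero t1 t2 i)
    _ = _ := by rw [List.map_const', List.length_range]

theorem rowB_inner (t1 t2 : List Char) (jp : Nat) :
    ∀ (inn : Nat), inn ≤ t1.length →
    ((PySem.List.pyRange 1 ((inn : Int) + 1) 1).foldl
      (fun row i =>
        row ++ [max (max (PySem.List.pyGetD (rowFun t1 t2 jp) (i - 1) 0 +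
                          if PySem.List.pyGetD t1 (i - 1) ' ' = PySem.List.pyGetD t2 ((jp : Int)) ' '
                          then 1 else -1)
                         (PySem.List.pyGetD (rowFun t1 t2 jp) i 0 - 1))
                    (PySem.List.pyGetD row (i - 1) 0 - 1)])
      [-((jp : Int) + 1)]) = (List.range (inn + 1)).map (fun i => Mv t1 t2 (jp + 1) i) := by
  intro inn
  induction inn with
  | zero =>
    intro _
    have h0 : PySem.List.pyRange 1 ((0 : Nat) + 1) 1 = [] := by decide
    rw [Nat.cast_zero] at h0 ⊢
    rw [h0]
    simp [List.range_succ, Mv_j_zero]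
  | succ m ih =>
    intro hle
    have hcast : ((m + 1 : Nat) : Int) + 1 = ((m : Int) + 1) + 1 := by push_cast; ring
    rw [hcast, PySem.List.pyRange_one_succ_right (by omega), List.foldl_append]
    rw [ih (by omega)]
    simp only [List.foldl_cons, List.foldl_nil]
    have e1 : (m : Int) + 1 - 1 = ((m : Nat) : Int) := by ring
    rw [e1]
    rw [PySem.List.pyGetD_natCast t1 m ' ', PySem.List.pyGetD_natCast t2 jp ' ']
    have e3 : ((m : Int) + 1) = ((m + 1 : Nat) : Int) := by push_cast; ring
    rw [rowFun, PySem.List.pyGetD_natCast, e3, PySem.List.pyGetD_natCast,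
      PySem.List.pyGetD_natCast]
    rw [PySem.List.getD_map_range _ _ _ _ (by omega),
      PySem.List.getD_map_range _ _ _ _ (by omega),
      PySem.List.getD_map_range _ _ _ _ (by omega)]
    rw [List.range_succ (n := m + 1), List.map_append]
    congr 1
    simp only [List.map_cons, List.map_nil]
    congr 1
    rw [Mv_succ_succ]
    rfl

theorem rowsB_outer (t1 t2 : List Char) :
    ∀ (kn : Nat), kn ≤ t2.length →
    ((PySem.List.pyRange 1 ((kn : Int) + 1) 1).foldl
      (fun m j =>
        let prev := PySem.List.pyGetD m (j - 1) []
        let row := (PySem.List.pyRange 1 (PySem.List.len t1 + 1) 1).foldl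
          (fun row i =>
            let match_ : Int :=
              if PySem.List.pyGetD t1 (i - 1) ' ' = PySem.List.pyGetD t2 (j - 1) ' ' then 1 else -1
            row ++ [max (max (PySem.List.pyGetD prev (i - 1) 0 + match_)
                             (PySem.List.pyGetD prev i 0 - 1))
                        (PySem.List.pyGetD row (i - 1) 0 - 1)])
          [-j]
        m ++ [row])
      [List.replicate (t1.length + 1) 0]) = (List.range (kn + 1)).map (rowFun t1 t2) := by
  intro kn
  induction kn with
  | zero =>
    intro _
    have h0 : PySem.List.pyRange 1 ((0 : Nat) + 1) 1 = [] := by decide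
    rw [Nat.cast_zero] at h0 ⊢
    rw [h0]
    simp [List.range_succ, rowFun_zero]
  | succ m ih =>
    intro hle
    have hcast : ((m + 1 : Nat) : Int) + 1 = ((m : Int) + 1) + 1 := by push_cast; ring
    rw [hcast, PySem.List.pyRange_one_succ_right (a := 1) (b := (m : Int) + 1) (by omega),
      List.foldl_append]
    rw [ih (by omega)]
    simp only [List.foldl_cons, List.foldl_nil]
    have e2 : ((m : Int) + 1) - 1 = ((m : Nat) : Int) := by ring
    rw [e2, PySem.List.pyGetD_natCast]
    rw [PySem.List.getD_map_range _ _ _ _ (by omega)]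
    have hrow := rowB_inner t1 t2 m t1.length (le_refl _)
    rw [PySem.List.len_eq t1]
    have e3 : ((t1.length : Nat) : Int) + 1 = (t1.length : Int) + 1 := rfl
    rw [e3]
    rw [hrow, List.range_succ (n := m + 1), List.map_append]
    rfl

theorem rowsB_spec (t1 t2 : List Char) :
    rowsB t1 t2 = (List.range (t2.length + 1)).map (rowFun t1 t2) := by
  rw [rowsB, PySem.List.len_eq t2]
  exact rowsB_outer t1 t2 t2.length (le_refl _)

theorem trace_eq (t1 t2 : List Char) :
    ∀ (fuel : Nat) (j i : Nat), j ≤ t2.length → i ≤ t1.length →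
    ∀ (a : List Char × List Char),
      getWordsAux (fillA t1 t2).2 t1 t2 fuel (j : Int) (i : Int) a =
        traceAux (rowsB t1 t2) t1 t2 fuel (j : Int) (i : Int) a := by
  intro fuel
  induction fuel with
  | zero => intro j i _ _ a; rfl
  | succ fuel ih =>
    intro j i hj hi a
    obtain ⟨a1, a2⟩ := a
    rw [getWordsAux, traceAux]
    by_cases hc : ((i : Int) > 0 ∧ (j : Int) > 0)
    case neg => rw [if_neg hc, if_neg hc]
    case pos =>
    rw [if_pos hc, if_pos hc]
    obtain ⟨jj, rfl⟩ : ∃ jj, j = jj + 1 := ⟨j - 1, by omega⟩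
    obtain ⟨ii, rfl⟩ : ∃ ii, i = ii + 1 := ⟨i - 1, by omega⟩
    have hjj : jj < t2.length := by omega
    have hii : ii < t1.length := by omega
    have ej : ((jj + 1 : Nat) : Int) = (jj : Int) + 1 := by push_cast; ring
    have ei : ((ii + 1 : Nat) : Int) = (ii : Int) + 1 := by push_cast; ring
    have ej1 : ((jj + 1 : Nat) : Int) - 1 = ((jj : Nat) : Int) := by push_cast; ring
    have ei1 : ((ii + 1 : Nat) : Int) - 1 = ((ii : Nat) : Int) := by push_cast; ring
    have hrows := rowsB_spec t1 t2
    -- the stored direction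
    have hdir : (fillA t1 t2).2.getD (((jj + 1 : Nat) : Int), ((ii + 1 : Nat) : Int)) "" =
        Dv t1 t2 jj ii := by
      rw [ej, ei]
      exact (fillA_spec t1 t2).2 jj ii hjj hii
    -- B's matrix reads
    have hrow1 : PySem.List.pyGetD (rowsB t1 t2) ((jj + 1 : Nat) : Int) [] =
        rowFun t1 t2 (jj + 1) := by
      rw [hrows, PySem.List.pyGetD_natCast, PySem.List.getD_map_range _ _ _ _ (by omega)]
    have hrow0 : PySem.List.pyGetD (rowsB t1 t2) (((jj + 1 : Nat) : Int) - 1) [] =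
        rowFun t1 t2 jj := by
      rw [ej1, hrows, PySem.List.pyGetD_natCast, PySem.List.getD_map_range _ _ _ _ (by omega)]
    have hv : PySem.List.pyGetD (rowFun t1 t2 (jj + 1)) ((ii + 1 : Nat) : Int) 0 =
        Mv t1 t2 (jj + 1) (ii + 1) := by
      rw [rowFun, PySem.List.pyGetD_natCast, PySem.List.getD_map_range _ _ _ _ (by omega)]
    have hb1 : PySem.List.pyGetD (rowFun t1 t2 jj) (((ii + 1 : Nat) : Int) - 1) 0 =
        Mv t1 t2 jj ii := by
      rw [ei1, rowFun, PySem.List.pyGetD_natCast, PySem.List.getD_map_range _ _ _ _ (by omega)]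
    have hb2 : PySem.List.pyGetD (rowFun t1 t2 jj) ((ii + 1 : Nat) : Int) 0 =
        Mv t1 t2 jj (ii + 1) := by
      rw [rowFun, PySem.List.pyGetD_natCast, PySem.List.getD_map_range _ _ _ _ (by omega)]
    have hmt : (if PySem.List.pyGetD t1 (((ii + 1 : Nat) : Int) - 1) ' '
        = PySem.List.pyGetD t2 (((jj + 1 : Nat) : Int) - 1) ' ' then (1 : Int) else -1)
        = mtc t1 t2 ii jj := by
      rw [ei1, ej1, PySem.List.pyGetD_natCast, PySem.List.pyGetD_natCast, mtc]
    rw [hdir, hrow1, hrow0, hv, hb1, hb2, hmt]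
    simp only [Mv_succ_succ]
    set av := Mv t1 t2 jj ii + mtc t1 t2 ii jj with hav
    set bv := Mv t1 t2 jj (ii + 1) - 1 with hbv
    set cv := Mv t1 t2 (jj + 1) ii - 1 with hcv
    have hDv : Dv t1 t2 jj ii =
        (if av = max (max av bv) cv then "diagonal"
         else if bv = max (max av bv) cv then "up" else "left") := by
      rw [Dv]
    by_cases hA : av = max (max av bv) cv
    · rw [hDv, if_pos hA]
      rw [if_pos rfl, if_pos hA]
      rw [ej1, ei1]
      exact ih jj ii (by omega) (by omega) _
    · rw [hDv, if_neg hA]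
      by_cases hB : bv = max (max av bv) cv
      · rw [if_pos hB]
        rw [if_neg (by decide : ¬("up" : String) = "diagonal"),
          if_neg (by decide : ¬("up" : String) = "left"), if_pos rfl, if_neg hA, if_pos hB]
        rw [ej1]
        exact ih jj (ii + 1) (by omega) (by omega) _
      · rw [if_neg hB]
        rw [if_neg (by decide : ¬("left" : String) = "diagonal"), if_pos rfl, if_neg hA,
          if_neg hB]
        rw [ei1]
        exact ih (jj + 1) ii (by omega) (by omega) _

theorem main_eq (s1 s2 : String) : fitting_alignment s1 s2 = fitting_alignment_alt s1 s2 := by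
  simp only [fitting_alignment, fitting_alignment_alt]
  set t1 := s1.toList with ht1
  set t2 := s2.toList with ht2
  have hlast : PySem.List.pyGetD (rowsB t1 t2) (PySem.List.len t2) [] =
      (List.range (t1.length + 1)).map (fun i => Mv t1 t2 t2.length i) := by
    rw [rowsB_spec, PySem.List.len_eq t2, PySem.List.pyGetD_natCast,
      PySem.List.getD_map_range _ _ _ _ (by omega), rowFun]
  have hsc : (PySem.List.pyRange 0 (PySem.List.len t1 + 1) 1).map
      (fun i => (fillA t1 t2).1.getD (PySem.List.len t2, i) 0)
      = (List.range (t1.length + 1)).map (fun i => Mv t1 t2 t2.length i) := by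
    rw [PySem.List.len_eq t1, PySem.List.pyRange_zero]
    have h1 : ((t1.length : Int) + 1).toNat = t1.length + 1 := by omega
    rw [h1, List.map_map]
    apply List.map_congr_left
    intro k hk
    rw [List.mem_range] at hk
    show (fillA t1 t2).1.getD (PySem.List.len t2, (k : Int)) 0 = Mv t1 t2 t2.length k
    rw [PySem.List.len_eq t2]
    exact (fillA_spec t1 t2).1 t2.length k (le_refl _) (by omega)
  rw [hlast, hsc]
  set L := (List.range (t1.length + 1)).map (fun i => Mv t1 t2 t2.length i) with hL
  set mx := (PySem.List.max? L (fun y => y)).getD 0 with hmx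
  set k : Nat := (PySem.List.index? L mx).getD 0 with hk
  have hkle : k ≤ t1.length := by
    rw [hk]
    cases hidx : PySem.List.index? L mx with
    | none => simp
    | some k' =>
      obtain ⟨hlt, -, -⟩ := PySem.List.getElem_of_index?_eq_some hidx
      rw [hL] at hlt
      simp only [List.length_map, List.length_range] at hlt
      simpa using Nat.lt_succ_iff.mp hlt
  rw [PySem.List.len_eq t2]
  rw [show ((t2.length : Int) + (k : Int)).toNat = ((t2.length : Nat) + k : Nat) by omega]
  rw [trace_eq t1 t2 _ t2.length k (le_refl _) hkle ([], [])]

-- ===== VERDICT (by name: the statement is the Claim_ definition above) =====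
theorem fitting_alignment_spec : Claim_equal_fitting_alignment := by
  intro s1 s2 _
  exact main_eq s1 s2
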